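-- pv_equiv track=rewrite | github.com/skyfall0119/codingTest | Python3/프로그래머스/1/258712. 가장 많이 받은 선물/가장 많이 받은 선물.py | solution
-- ===== SOURCE A (Python) =====
-- def solution(friends, gifts):
--
--
--     status = {}
--     jisu = {}
--
--
--     for i in gifts :
--         sent, received = i.split(" ")
--         ## 선물 현황 딕셔너리로
--         if (sent,received) not in status :
--             status[sent,received] = 1
--         else :
--             status[sent,received] += 1
--
--         ## 선물지수
--         if sent not in jisu :
--             jisu[sent] = [0,0]
--         if received not in jisu :
--             jisu[received] = [0,0]
--
--         jisu[sent][0] += 1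
--         jisu[received][1] += 1
--
--
--
--     maxGift = 0
--
--     for sender in friends :
--         giftToGet = 0
--         for receiver in friends :
--
--             if sender not in jisu :
--                 jisu[sender] = [0,0]
--             if receiver not in jisu :
--                 jisu[receiver] = [0,0]
--
--             jisuSent = jisu[sender][0]-jisu[sender][1]
--             jisuReceived = jisu[receiver][0]-jisu[receiver][1]
--
--             ## 주고받은 내역 없음. or 같은 수 주고받음. 지수가 더 크면 받을 선물 증가
--             if (((sender, receiver) not in status) and ((receiver, sender) not in status))  :
--                 if jisuSent - jisuReceived  > 0 :
--                     giftToGet += 1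
--
--             ## 받은거 없이 주기만 함
--             elif (receiver, sender) not in status :
--                 giftToGet += 1
--
--             ## 준거 없이 받기만 함. 패스
--             elif (sender, receiver) not in status :
--                 pass
--
--             ## 선물 더 많이 줬을때
--             elif (status[sender,receiver] > status[receiver,sender]) :
--                 giftToGet += 1
--
--             ## 선물 수가 같을 때
--             elif (status[sender,receiver] == status[receiver,sender]) :
--                 if jisuSent - jisuReceived > 0 :
--                     giftToGet += 1
--
--         # 최고 선물받는 수 업데이트
--         if giftToGet > maxGift :
--             maxGift = giftToGet
--
--     return maxGift
-- ===== SOURCE B (Python) =====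
-- def solution(friends, gifts):
--     # Tally exchanged-gift counts and net gift index (sent - received) in one pass.
--     status = {}
--     net = {}
--     for g in gifts:
--         s, r = g.split(" ")
--         status[(s, r)] = status.get((s, r), 0) + 1
--         net[s] = net.get(s, 0) + 1
--         net[r] = net.get(r, 0) - 1
--
--     def beats(x, y):
--         a = status.get((x, y), 0)
--         b = status.get((y, x), 0)
--         return a > b or (a == b and net.get(x, 0) > net.get(y, 0))
--
--     # Decide every unordered pair once, building the per-friend win counts
--     # back-to-front: counts is aligned with the suffix of friends seen so far.
--     suffix = []
--     counts = []
--     for x in reversed(friends):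
--         c = 0
--         newcounts = []
--         for y, b in zip(suffix, counts):
--             if beats(x, y):
--                 c += 1
--             newcounts.append(b + 1 if beats(y, x) else b)
--         suffix = [x] + suffix
--         counts = [c] + newcounts
--     return max(counts, default=0)
-- ===== Notes on version B (the rewrite author's own statement) =====
-- stated objective: alternative
-- what changed: B replaces A's ordered double loop with its threaded jisu dict and 5-branch membership tests by a one-pass tally of gift counts plus a single net gift-index dict, then a back-to-front suffix scan that decides each unordered pair of friends exactly once with a pure beats() predicate, building a per-friend win-count list and returning max(counts, default=0).
import Mathlib
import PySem

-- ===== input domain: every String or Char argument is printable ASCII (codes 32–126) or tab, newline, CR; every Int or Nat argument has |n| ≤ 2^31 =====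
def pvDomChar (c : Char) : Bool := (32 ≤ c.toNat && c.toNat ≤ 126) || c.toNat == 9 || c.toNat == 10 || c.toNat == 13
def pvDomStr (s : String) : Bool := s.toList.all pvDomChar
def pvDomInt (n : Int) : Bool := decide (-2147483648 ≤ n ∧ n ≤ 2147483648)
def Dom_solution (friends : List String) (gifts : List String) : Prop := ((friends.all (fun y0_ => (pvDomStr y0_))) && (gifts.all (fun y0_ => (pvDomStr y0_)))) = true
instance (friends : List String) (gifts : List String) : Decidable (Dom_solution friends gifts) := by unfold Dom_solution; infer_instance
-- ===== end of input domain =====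

-- B replaces A's jisu-dict threading and full ordered double loop by a one-pass net-index tally
-- and a back-to-front suffix scan deciding each unordered pair once (objective: alternative).

set_option maxRecDepth 4096

-- shared one-liner: `sent, received = i.split(" ")` (Pre_ guarantees exactly two parts;
-- the .getD defaults are never used under Pre_)
def pvParse (g : String) : String × String :=
  let parts := (PySem.Str.split? g " ").getD []
  (parts.getD 0 "", parts.getD 1 "")

-- ===== PORT A =====
-- Python's two-element list [sent_count, received_count] is represented as an Int pair
-- (exact: only indices 0 and 1 are ever touched).
def pvStepGiftsA (st : PySem.Dict (String × String) Int × PySem.Dict String (Int × Int))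
    (i : String) : PySem.Dict (String × String) Int × PySem.Dict String (Int × Int) :=
  let p := pvParse i
  let status := if st.1.contains p = false then st.1.insert p 1 else st.1.modify p 0 (· + 1)
  let jisu := if st.2.contains p.1 = false then st.2.insert p.1 (0, 0) else st.2
  let jisu := if jisu.contains p.2 = false then jisu.insert p.2 (0, 0) else jisu
  let jisu := jisu.modify p.1 (0, 0) (fun q => (q.1 + 1, q.2))
  let jisu := jisu.modify p.2 (0, 0) (fun q => (q.1, q.2 + 1))
  (status, jisu)

-- body of A's inner `for receiver in friends` loop (keys read are present, so getD is exact)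
def pvInnerA (status : PySem.Dict (String × String) Int) (sender : String)
    (st : PySem.Dict String (Int × Int) × Int) (receiver : String) :
    PySem.Dict String (Int × Int) × Int :=
  let jisu := if st.1.contains sender = false then st.1.insert sender (0, 0) else st.1
  let jisu := if jisu.contains receiver = false then jisu.insert receiver (0, 0) else jisu
  let jisuSent := (jisu.getD sender (0, 0)).1 - (jisu.getD sender (0, 0)).2
  let jisuReceived := (jisu.getD receiver (0, 0)).1 - (jisu.getD receiver (0, 0)).2
  let g :=
    if status.contains (sender, receiver) = false ∧ status.contains (receiver, sender) = false then
      if jisuSent - jisuReceived > 0 then st.2 + 1 else st.2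
    else if status.contains (receiver, sender) = false then st.2 + 1
    else if status.contains (sender, receiver) = false then st.2
    else if status.getD (sender, receiver) 0 > status.getD (receiver, sender) 0 then st.2 + 1
    else if status.getD (sender, receiver) 0 = status.getD (receiver, sender) 0 then
      if jisuSent - jisuReceived > 0 then st.2 + 1 else st.2
    else st.2
  (jisu, g)

def solution (friends : List String) (gifts : List String) : Int :=
  let sj := gifts.foldl pvStepGiftsA (PySem.Dict.empty, PySem.Dict.empty)
  let res := friends.foldl
    (fun (acc : PySem.Dict String (Int × Int) × Int) sender =>
      let inner := friends.foldl (pvInnerA sj.1 sender) (acc.1, 0)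
      (inner.1, if inner.2 > acc.2 then inner.2 else acc.2))
    (sj.2, 0)
  res.2

-- ===== PORT B =====
def pvStepGiftsB (st : PySem.Dict (String × String) Int × PySem.Dict String Int)
    (g : String) : PySem.Dict (String × String) Int × PySem.Dict String Int :=
  let p := pvParse g
  let status := st.1.insert p (st.1.getD p 0 + 1)
  let net := st.2.insert p.1 (st.2.getD p.1 0 + 1)
  let net := net.insert p.2 (net.getD p.2 0 - 1)
  (status, net)

-- B's local helper `beats`
def pvBeats (status : PySem.Dict (String × String) Int) (net : PySem.Dict String Int)
    (x y : String) : Bool :=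
  let a := status.getD (x, y) 0
  let b := status.getD (y, x) 0
  a > b || (a == b && net.getD x 0 > net.getD y 0)

-- body of B's `for x in reversed(friends)` loop
def pvStepB (status : PySem.Dict (String × String) Int) (net : PySem.Dict String Int)
    (sc : List String × List Int) (x : String) : List String × List Int :=
  let inner := (sc.1.zip sc.2).foldl
    (fun (cn : Int × List Int) yb =>
      (if pvBeats status net x yb.1 then cn.1 + 1 else cn.1,
       cn.2 ++ [if pvBeats status net yb.1 x then yb.2 + 1 else yb.2]))
    (0, [])
  (x :: sc.1, inner.1 :: inner.2)

def solution_alt (friends : List String) (gifts : List String) : Int :=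
  let sn := gifts.foldl pvStepGiftsB (PySem.Dict.empty, PySem.Dict.empty)
  let res := friends.reverse.foldl (pvStepB sn.1 sn.2) ([], [])
  PySem.List.maxD res.2 (fun v => v) 0

-- ===== PRECONDITION & SPEC =====
-- Pre_ excludes exactly the gift strings without exactly one space: there `sent, received =
-- i.split(" ")` raises ValueError in A (B raises there too).
def Pre_solution (friends : List String) (gifts : List String) : Prop :=
  ∀ g ∈ gifts, PySem.Str.count g " " = 1
instance (friends : List String) (gifts : List String) : Decidable (Pre_solution friends gifts) := by
  unfold Pre_solution; infer_instance

def pvWitness_solution : List String × List String :=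
  (["muzi", "ryan", "frodo"], ["muzi ryan", "ryan muzi", "muzi frodo"])

def Spec_solution (friends : List String) (gifts : List String) (out : Int) : Prop := out = solution_alt friends gifts
instance (friends : List String) (gifts : List String) (out : Int) : Decidable (Spec_solution friends gifts out) := by unfold Spec_solution; infer_instance

-- ===== CLAIM (what is proved, stated in full; the proofs are below) =====
def Claim_equal_solution : Prop := ∀ (friends : List String) (gifts : List String), Dom_solution friends gifts → Pre_solution friends gifts → Spec_solution friends gifts (solution friends gifts)

-- ===== LEMMAS AND PROOFS =====

-- canonical (proof-side) descriptions of the data both phase-1 passes build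
def pvPairs (gifts : List String) : List (String × String) := gifts.map pvParse

def pvS (gifts : List String) (p : String × String) : Int := ((pvPairs gifts).count p : Int)

def pvN (gifts : List String) (x : String) : Int :=
  ((pvPairs gifts).countP (fun q => q.1 == x) : Int) - ((pvPairs gifts).countP (fun q => q.2 == x) : Int)

-- the winner predicate both programs implement
def pvW (gifts : List String) (x y : String) : Bool :=
  decide (pvS gifts (x, y) > pvS gifts (y, x)) ||
    (decide (pvS gifts (x, y) = pvS gifts (y, x)) && decide (pvN gifts x > pvN gifts y))

def pvCnt (friends gifts : List String) (s : String) : Int :=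
  (friends.countP (fun r => pvW gifts s r) : Int)

theorem pvW_self (gifts : List String) (x : String) : pvW gifts x x = false := by
  simp [pvW]

theorem pvN_cons (g : String) (gs : List String) (x : String) :
    pvN (g :: gs) x = ((if (pvParse g).1 = x then 1 else 0) - (if (pvParse g).2 = x then 1 else 0)) + pvN gs x := by
  simp only [pvN, pvPairs, List.map_cons, List.countP_cons]
  split_ifs <;> simp_all <;> ring

theorem pvS_nonneg (gifts : List String) (p : String × String) : 0 ≤ pvS gifts p := by
  simp [pvS]

theorem pvS_pos_iff (gifts : List String) (p : String × String) :
    0 < pvS gifts p ↔ p ∈ pvPairs gifts := by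
  simp [pvS]

-- ---- component views of the two phase-1 folds ----
def pvFStB (d : PySem.Dict (String × String) Int) (g : String) : PySem.Dict (String × String) Int :=
  d.insert (pvParse g) (d.getD (pvParse g) 0 + 1)

def pvFNetB (d : PySem.Dict String Int) (g : String) : PySem.Dict String Int :=
  let p := pvParse g
  let net := d.insert p.1 (d.getD p.1 0 + 1)
  net.insert p.2 (net.getD p.2 0 - 1)

theorem foldlB_split (gifts : List String) :
    gifts.foldl pvStepGiftsB (PySem.Dict.empty, PySem.Dict.empty)
      = (gifts.foldl pvFStB PySem.Dict.empty, gifts.foldl pvFNetB PySem.Dict.empty) := by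
  rw [show pvStepGiftsB = (fun s e => (pvFStB s.1 e, pvFNetB s.2 e)) from rfl]
  exact PySem.List.foldl_prod_mk pvFStB pvFNetB gifts _ _

def pvFStA (d : PySem.Dict (String × String) Int) (g : String) : PySem.Dict (String × String) Int :=
  let p := pvParse g
  if d.contains p = false then d.insert p 1 else d.modify p 0 (· + 1)

def pvFJisuA (j : PySem.Dict String (Int × Int)) (g : String) : PySem.Dict String (Int × Int) :=
  let p := pvParse g
  let j := if j.contains p.1 = false then j.insert p.1 (0, 0) else j
  let j := if j.contains p.2 = false then j.insert p.2 (0, 0) else j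
  let j := j.modify p.1 (0, 0) (fun q => (q.1 + 1, q.2))
  j.modify p.2 (0, 0) (fun q => (q.1, q.2 + 1))

theorem foldlA_split (gifts : List String) :
    gifts.foldl pvStepGiftsA (PySem.Dict.empty, PySem.Dict.empty)
      = (gifts.foldl pvFStA PySem.Dict.empty, gifts.foldl pvFJisuA PySem.Dict.empty) := by
  rw [show pvStepGiftsA = (fun s e => (pvFStA s.1 e, pvFJisuA s.2 e)) from rfl]
  exact PySem.List.foldl_prod_mk pvFStA pvFJisuA gifts _ _

-- ---- phase 1, B side ----
theorem statusB_getD (gifts : List String) (p : String × String) :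
    (gifts.foldl pvStepGiftsB (PySem.Dict.empty, PySem.Dict.empty)).1.getD p 0 = pvS gifts p := by
  rw [foldlB_split]
  have h : gifts.foldl pvFStB PySem.Dict.empty
      = (gifts.map pvParse).foldl (fun d q => d.insert q (d.getD q 0 + 1)) PySem.Dict.empty := by
    rw [List.foldl_map]
    rfl
  show (gifts.foldl pvFStB PySem.Dict.empty).getD p 0 = pvS gifts p
  rw [h, PySem.Dict.getD_foldl_insert_add_one, PySem.Dict.getD_empty]
  simp [pvS, pvPairs]

theorem netB_run (gs : List String) (d : PySem.Dict String Int) (x : String) :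
    (gs.foldl pvFNetB d).getD x 0 = d.getD x 0 + pvN gs x := by
  induction gs generalizing d with
  | nil => simp [pvN, pvPairs]
  | cons g gs ih =>
    rw [List.foldl_cons, ih, pvN_cons]
    have h : (pvFNetB d g).getD x 0
        = d.getD x 0 + ((if (pvParse g).1 = x then 1 else 0) - (if (pvParse g).2 = x then 1 else 0)) := by
      rcases hp : pvParse g with ⟨ps, pr⟩
      simp only [pvFNetB, hp, PySem.Dict.getD_insert]
      split_ifs <;> subst_vars <;> simp_all <;> omega
    rw [h]; ring

theorem netB_getD (gifts : List String) (x : String) :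
    (gifts.foldl pvStepGiftsB (PySem.Dict.empty, PySem.Dict.empty)).2.getD x 0 = pvN gifts x := by
  rw [foldlB_split]
  simpa [PySem.Dict.getD_empty] using netB_run gifts PySem.Dict.empty x

theorem pvBeats_eq (gifts : List String) (x y : String) :
    pvBeats (gifts.foldl pvStepGiftsB (PySem.Dict.empty, PySem.Dict.empty)).1
      (gifts.foldl pvStepGiftsB (PySem.Dict.empty, PySem.Dict.empty)).2 x y = pvW gifts x y := by
  simp only [pvBeats, statusB_getD, netB_getD, pvW]
  by_cases h : pvS gifts (x, y) = pvS gifts (y, x) <;> simp [h]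

-- ---- phase 1, A side ----
theorem stA_run (gs : List String) (d : PySem.Dict (String × String) Int) (q : String × String) :
    ((gs.foldl pvFStA d).getD q 0 = d.getD q 0 + ((gs.map pvParse).count q : Int))
      ∧ ((gs.foldl pvFStA d).contains q = (d.contains q || decide (q ∈ gs.map pvParse))) := by
  induction gs generalizing d with
  | nil => simp
  | cons g gs ih =>
    rw [List.foldl_cons]
    obtain ⟨ih1, ih2⟩ := ih (pvFStA d g)
    constructor
    · rw [ih1]
      have h : (pvFStA d g).getD q 0 = d.getD q 0 + (if q = pvParse g then 1 else 0) := by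
        unfold pvFStA
        by_cases hc : d.contains (pvParse g) = false
        · rw [if_pos hc, PySem.Dict.getD_insert]
          by_cases hq : q = pvParse g
          · rw [if_pos hq, if_pos hq, hq, PySem.Dict.getD_of_not_contains d 0 hc]
            omega
          · rw [if_neg hq, if_neg hq]; ring
        · rw [if_neg hc, PySem.Dict.getD_modify]
          by_cases hq : q = pvParse g
          · rw [if_pos hq, if_pos hq, hq]
          · rw [if_neg hq, if_neg hq]; ring
      rw [h, List.map_cons, List.count_cons]
      by_cases hq : q = pvParse g
      · subst hq
        simp
        omega
      · have hbq : (pvParse g == q) = false := by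
          simp only [beq_eq_false_iff_ne, ne_eq]
          exact fun e => hq e.symm
        simp [hq, hbq]
    · rw [ih2]
      have h : (pvFStA d g).contains q = (d.contains q || q == pvParse g) := by
        unfold pvFStA
        by_cases hc : d.contains (pvParse g) = false
        · rw [if_pos hc, PySem.Dict.contains_insert, Bool.or_comm]
        · rw [if_neg hc, PySem.Dict.contains_modify, Bool.or_comm]
      rw [h, List.map_cons]
      by_cases hq : q = pvParse g <;>
        simp [hq, List.mem_cons, Bool.or_assoc, Bool.or_comm]

theorem statusA_getD (gifts : List String) (p : String × String) :
    (gifts.foldl pvStepGiftsA (PySem.Dict.empty, PySem.Dict.empty)).1.getD p 0 = pvS gifts p := by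
  rw [foldlA_split]
  have h := (stA_run gifts PySem.Dict.empty p).1
  rw [PySem.Dict.getD_empty] at h
  simpa [pvS, pvPairs] using h

theorem statusA_contains (gifts : List String) (p : String × String) :
    (gifts.foldl pvStepGiftsA (PySem.Dict.empty, PySem.Dict.empty)).1.contains p
      = decide (p ∈ pvPairs gifts) := by
  rw [foldlA_split]
  have h := (stA_run gifts PySem.Dict.empty p).2
  simpa [pvPairs, PySem.Dict.contains_empty] using h

-- "the jisu dict reads as the net gift index" invariant
def pvJ (gifts : List String) (j : PySem.Dict String (Int × Int)) : Prop :=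
  ∀ x, (j.getD x (0, 0)).1 - (j.getD x (0, 0)).2 = pvN gifts x

-- conditionally inserting the default value never changes any getD read
theorem pad_getD (j : PySem.Dict String (Int × Int)) (k x : String) :
    ((if j.contains k = false then j.insert k (0, 0) else j).getD x (0, 0)) = j.getD x (0, 0) := by
  by_cases h : j.contains k = false
  · rw [if_pos h, PySem.Dict.getD_insert]
    by_cases hx : x = k
    · rw [if_pos hx, hx, PySem.Dict.getD_of_not_contains j _ h]
    · rw [if_neg hx]
  · rw [if_neg h]

theorem jisuA_step (j : PySem.Dict String (Int × Int)) (g : String) (x : String) :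
    ((pvFJisuA j g).getD x (0, 0)).1 - ((pvFJisuA j g).getD x (0, 0)).2
      = (j.getD x (0, 0)).1 - (j.getD x (0, 0)).2
        + ((if (pvParse g).1 = x then 1 else 0) - (if (pvParse g).2 = x then 1 else 0)) := by
  rcases hp : pvParse g with ⟨ps, pr⟩
  simp only [pvFJisuA, hp]
  rw [PySem.Dict.getD_modify]
  by_cases h2 : x = pr
  · rw [if_pos h2, PySem.Dict.getD_modify, h2]
    by_cases h1 : pr = ps <;>
      simp [h1, pad_getD] <;> split_ifs <;> simp_all <;> omega
  · rw [if_neg h2, PySem.Dict.getD_modify]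
    by_cases h1 : x = ps <;>
      simp [h1, pad_getD] <;> split_ifs <;> simp_all <;> omega

theorem jisuA_run (gs : List String) (j : PySem.Dict String (Int × Int)) (x : String) :
    ((gs.foldl pvFJisuA j).getD x (0, 0)).1 - ((gs.foldl pvFJisuA j).getD x (0, 0)).2
      = (j.getD x (0, 0)).1 - (j.getD x (0, 0)).2 + pvN gs x := by
  induction gs generalizing j with
  | nil => simp [pvN, pvPairs]
  | cons g gs ih =>
    rw [List.foldl_cons, ih, jisuA_step, pvN_cons]
    ring

theorem jisuA_view (gifts : List String) :
    pvJ gifts (gifts.foldl pvStepGiftsA (PySem.Dict.empty, PySem.Dict.empty)).2 := by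
  rw [foldlA_split]
  intro x
  simpa [PySem.Dict.getD_empty] using jisuA_run gifts PySem.Dict.empty x

-- ---- phase 2, A side ----
theorem pvJ_pad (gifts : List String) (j : PySem.Dict String (Int × Int)) (k : String)
    (hj : pvJ gifts j) : pvJ gifts (if j.contains k = false then j.insert k (0, 0) else j) := by
  intro x
  rw [pad_getD]
  exact hj x

theorem innerA_run (gifts : List String) (sender : String) (rs : List String)
    (j : PySem.Dict String (Int × Int)) (g : Int) (hj : pvJ gifts j) :
    (rs.foldl (pvInnerA (gifts.foldl pvStepGiftsA (PySem.Dict.empty, PySem.Dict.empty)).1 sender) (j, g)).2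
        = g + (rs.countP (fun r => pvW gifts sender r) : Int)
      ∧ pvJ gifts (rs.foldl (pvInnerA (gifts.foldl pvStepGiftsA (PySem.Dict.empty, PySem.Dict.empty)).1 sender) (j, g)).1 := by
  induction rs generalizing j g with
  | nil => exact ⟨by simp, hj⟩
  | cons r rs ih =>
    have hpad1 : pvJ gifts (if j.contains sender = false then j.insert sender (0, 0) else j) :=
      pvJ_pad gifts j sender hj
    have hpad2 : pvJ gifts (if (if j.contains sender = false then j.insert sender (0, 0) else j).contains r = false
        then (if j.contains sender = false then j.insert sender (0, 0) else j).insert r (0, 0)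
        else (if j.contains sender = false then j.insert sender (0, 0) else j)) :=
      pvJ_pad gifts _ r hpad1
    have hstep : pvInnerA (gifts.foldl pvStepGiftsA (PySem.Dict.empty, PySem.Dict.empty)).1 sender (j, g) r
        = ((if (if j.contains sender = false then j.insert sender (0, 0) else j).contains r = false
              then (if j.contains sender = false then j.insert sender (0, 0) else j).insert r (0, 0)
              else (if j.contains sender = false then j.insert sender (0, 0) else j)),
           g + (if pvW gifts sender r then 1 else 0)) := by
      have hs := hpad2 sender
      have hr := hpad2 r
      have e1 := pvS_pos_iff gifts (sender, r)
      have e2 := pvS_pos_iff gifts (r, sender)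
      have n1 := pvS_nonneg gifts (sender, r)
      have n2 := pvS_nonneg gifts (r, sender)
      simp only [pvInnerA, statusA_contains, statusA_getD, hs, hr]
      refine Prod.ext rfl ?_
      simp only [pvW]
      split_ifs <;> simp_all <;> omega
    rw [List.foldl_cons, hstep]
    obtain ⟨ih1, ih2⟩ := ih _ _ hpad2
    refine ⟨?_, ih2⟩
    rw [ih1, List.countP_cons]
    by_cases hw : pvW gifts sender r = true <;> simp [hw] <;> ring

theorem solutionA_eq (friends gifts : List String) :
    solution friends gifts
      = (friends.map (pvCnt friends gifts)).foldl (fun m g => if g > m then g else m) 0 := by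
  unfold solution
  have hview := jisuA_view gifts
  rw [List.foldl_map]
  suffices h : ∀ (fs : List String) (j : PySem.Dict String (Int × Int)) (m : Int), pvJ gifts j →
      (fs.foldl (fun (acc : PySem.Dict String (Int × Int) × Int) sender =>
          let inner := friends.foldl (pvInnerA (gifts.foldl pvStepGiftsA (PySem.Dict.empty, PySem.Dict.empty)).1 sender) (acc.1, 0)
          (inner.1, if inner.2 > acc.2 then inner.2 else acc.2)) (j, m)).2
        = fs.foldl (fun m s => if pvCnt friends gifts s > m then pvCnt friends gifts s else m) m by
    exact h friends _ 0 hview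
  intro fs
  induction fs with
  | nil => intro j m hj; rfl
  | cons s fs ih =>
    intro j m hj
    obtain ⟨h1, h2⟩ := innerA_run gifts s friends j 0 hj
    simp only [List.foldl_cons]
    rw [ih _ _ h2]
    congr 1
    rw [h1]
    simp [pvCnt]

-- ---- phase 2, B side ----
theorem B_loop (gifts : List String) (xs : List String) :
    (xs.reverse.foldl (pvStepB (gifts.foldl pvStepGiftsB (PySem.Dict.empty, PySem.Dict.empty)).1
        (gifts.foldl pvStepGiftsB (PySem.Dict.empty, PySem.Dict.empty)).2) ([], []))
      = (xs, xs.map (fun s => (xs.countP (fun r => pvW gifts s r) : Int))) := by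
  rw [List.foldl_reverse]
  induction xs with
  | nil => rfl
  | cons x l ih =>
    rw [List.foldr_cons, ih]
    have hzip : l.zip (l.map (fun s => (l.countP (fun r => pvW gifts s r) : Int)))
        = l.map (fun y => (y, (l.countP (fun r => pvW gifts y r) : Int))) := by
      have h := List.zip_map' (f := fun (y : String) => y)
        (g := fun s => (l.countP (fun r => pvW gifts s r) : Int)) (l := l)
      simpa using h
    simp only [pvStepB, hzip, List.foldl_map]
    rw [PySem.List.foldl_prod_mk
      (f := fun c (y : String) => if pvBeats (gifts.foldl pvStepGiftsB (PySem.Dict.empty, PySem.Dict.empty)).1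
          (gifts.foldl pvStepGiftsB (PySem.Dict.empty, PySem.Dict.empty)).2 x y then c + 1 else c)
      (g := fun acc (y : String) => acc ++ [if pvBeats (gifts.foldl pvStepGiftsB (PySem.Dict.empty, PySem.Dict.empty)).1
          (gifts.foldl pvStepGiftsB (PySem.Dict.empty, PySem.Dict.empty)).2 y x
        then (l.countP (fun r => pvW gifts y r) : Int) + 1 else (l.countP (fun r => pvW gifts y r) : Int)])]
    rw [PySem.List.foldl_if_add_one, PySem.List.foldl_append_singleton_eq_map]
    simp only [pvBeats_eq, List.nil_append, List.map_cons]
    refine Prod.ext rfl ?_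
    show _ :: _ = _ :: _
    congr 1
    · rw [List.countP_cons]
      simp [pvW_self]
      exact List.countP_congr (fun y _ => by rw [pvBeats_eq])
    · apply List.map_congr_left
      intro y hy
      rw [List.countP_cons]
      by_cases hw : pvW gifts y x = true <;> simp [hw]

theorem solutionB_eq (friends gifts : List String) :
    solution_alt friends gifts
      = PySem.List.maxD (friends.map (pvCnt friends gifts)) (fun v => v) 0 := by
  show PySem.List.maxD (friends.reverse.foldl
      (pvStepB (gifts.foldl pvStepGiftsB (PySem.Dict.empty, PySem.Dict.empty)).1
        (gifts.foldl pvStepGiftsB (PySem.Dict.empty, PySem.Dict.empty)).2) ([], [])).2 (fun v => v) 0 = _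
  rw [B_loop gifts friends]
  rfl

-- ---- running max vs max(·, default=0) ----
theorem foldl_max_eq_maxD (vals : List Int) (h : ∀ v ∈ vals, 0 ≤ v) :
    vals.foldl (fun m g => if g > m then g else m) 0 = PySem.List.maxD vals (fun v => v) 0 := by
  have hstep : (fun (m g : Int) => if g > m then g else m) = max := by
    funext m g
    rw [max_def]
    split_ifs <;> omega
  rw [hstep]
  cases vals with
  | nil => rfl
  | cons x t =>
    have hx : (0 : Int) ≤ x := h x (by simp)
    rw [List.foldl_cons, show max 0 x = x from by omega]
    simp [PySem.List.maxD, PySem.List.max?_id_cons]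

-- ===== VERDICT (by name: the statement is the Claim_ definition above) =====
theorem solution_spec : Claim_equal_solution := by
  intro friends gifts _ _
  unfold Spec_solution
  rw [solutionA_eq, solutionB_eq, foldl_max_eq_maxD]
  intro v hv
  rcases List.mem_map.mp hv with ⟨s, _, rfl⟩
  simp [pvCnt]
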